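-- pv_equiv track=rewrite | github.com/tupkalenkodi/DONE | Final_15_2019/latin_DONE.py | regular_square
-- ===== SOURCE A (Python) =====
-- def regular_square(n):
--     if n == 1:
--         return [[1]]
--     else:
--         m = regular_square(n-1)
--         new_m = []
--         counter = n-1
--         tmp2 = []
--         for row in m:
--             if counter == n-1:
--                 row.insert(0, n)
--                 tmp2 = row.copy()
--                 row.remove(n)
--
--             row.insert(counter, n)
--             tmp = row.copy()
--             new_m.append(tmp)
--             counter -= 1
--         new_m.append(tmp2)
--
--         return new_m
-- ===== SOURCE B (Python) =====
-- def regular_square(n):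
--     # closed form: cell (i, j) of the cyclic Latin square is ((i + j) % n) + 1
--     return [[(i + j) % n + 1 for j in range(n)] for i in range(n)]
-- ===== Notes on version B (the rewrite author's own statement) =====
-- stated objective: faster
-- what changed: replaced the recursive build-from-(n-1) with in-place-style list insert/remove/copy passes by a direct closed-form double loop cell[i][j] = ((i+j) % n) + 1
-- outside the precondition, e.g. on regular_square(0): A raises RecursionError, B returns []
import Mathlib
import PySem

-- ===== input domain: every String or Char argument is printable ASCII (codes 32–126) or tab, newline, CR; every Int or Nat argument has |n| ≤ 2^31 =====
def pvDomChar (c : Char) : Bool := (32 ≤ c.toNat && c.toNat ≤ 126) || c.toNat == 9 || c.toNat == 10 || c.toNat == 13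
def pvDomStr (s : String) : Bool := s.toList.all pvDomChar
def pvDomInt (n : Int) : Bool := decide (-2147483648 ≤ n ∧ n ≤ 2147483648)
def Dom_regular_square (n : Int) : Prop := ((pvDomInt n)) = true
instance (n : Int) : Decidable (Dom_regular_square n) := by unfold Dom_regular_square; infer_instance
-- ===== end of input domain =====

-- B replaces A's recursive build (insert/remove/copy passes over the (n-1)-square) by the closed form cell[i][j] = ((i+j) % n) + 1.

-- ===== PORT A =====
-- the body of A's `for row in m` loop, state = (new_m, counter, tmp2)
def regular_square_body (n : Int) (st : List (List Int) × Int × List Int) (row : List Int) :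
    List (List Int) × Int × List Int :=
  let new_m := st.1
  let counter := st.2.1
  let tmp2 := st.2.2
  let rt : List Int × List Int :=
    if counter == n - 1 then
      let row1 := PySem.List.insert row 0 n        -- row.insert(0, n)
      let tmp2' := row1                             -- tmp2 = row.copy()
      let row2 := (PySem.List.remove? row1 n).getD []  -- row.remove(n); n is present (just inserted), so never ValueError
      (row2, tmp2')
    else (row, tmp2)
  (new_m ++ [PySem.List.insert rt.1 counter n], counter - 1, rt.2)

-- the else-branch of A for one recursion step (from the (n-1)-square m to the n-square)
def regular_square_step (n : Int) (m : List (List Int)) : List (List Int) :=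
  let st := m.foldl (regular_square_body n) ([], n - 1, [])
  st.1 ++ [st.2.2]

-- A's recursion, on fuel k = n - 1 (A diverges for n ≤ 0; those inputs are outside Pre_)
def regular_square_rec : Nat → List (List Int)
  | 0 => [[1]]
  | k + 1 => regular_square_step ((k : Int) + 2) (regular_square_rec k)

def regular_square (n : Int) : List (List Int) :=
  if n == 1 then [[1]] else regular_square_rec (n - 1).toNat

-- ===== PORT B =====
def regular_square_alt (n : Int) : List (List Int) :=
  (PySem.List.pyRange 0 n 1).map (fun i =>
    (PySem.List.pyRange 0 n 1).map (fun j => PySem.Int.mod (i + j) n + 1))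

-- ===== PRECONDITION & SPEC =====
-- Pre_ excludes n ≤ 0, on which A recurses forever (RecursionError); A returns normally on every n ≥ 1.
def Pre_regular_square (n : Int) : Prop := 1 ≤ n
instance (n : Int) : Decidable (Pre_regular_square n) := by unfold Pre_regular_square; infer_instance
def pvWitness_regular_square : Int := 4

def Spec_regular_square (n : Int) (out : List (List Int)) : Prop := out = regular_square_alt n
instance (n : Int) (out : List (List Int)) : Decidable (Spec_regular_square n out) := by unfold Spec_regular_square; infer_instance

-- ===== CLAIM =====
def Claim_equal_regular_square : Prop := ∀ (n : Int), Dom_regular_square n → Pre_regular_square n → Spec_regular_square n (regular_square n)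

-- ===== LEMMAS AND PROOFS =====

-- the closed form, over Nat indices
def pvFrow (N i : Nat) : List Int := (List.range N).map (fun j => (((i + j) % N : Nat) : Int) + 1)
def pvF (N : Nat) : List (List Int) := (List.range N).map (pvFrow N)

theorem pv_alt_eq (n : Int) (hn : 0 ≤ n) : regular_square_alt n = pvF n.toNat := by
  unfold regular_square_alt pvF pvFrow
  rw [PySem.List.pyRange_one]
  simp only [sub_zero, List.map_map]
  apply List.map_congr_left
  intro i hi
  simp only [Function.comp, zero_add]
  apply List.map_congr_left
  intro j hj
  simp only [Function.comp_apply]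
  simp only [List.mem_range] at hi hj
  rw [PySem.Int.mod_eq_emod_of_pos (by omega)]
  push_cast
  rw [Int.toNat_of_nonneg hn]

-- the tail of the fold never re-enters the counter == n-1 branch
theorem pv_fold_go (n : Int) (rest : List (List Int)) (acc : List (List Int)) (c : Int) (t : List Int)
    (hc : c < n - 1) :
    rest.foldl (regular_square_body n) (acc, c, t) =
      (acc ++ rest.mapIdx (fun r row => PySem.List.insert row (c - r) n), c - rest.length, t) := by
  induction rest generalizing acc c with
  | nil => simp
  | cons row rest ih =>
    simp only [List.foldl_cons, List.mapIdx_cons]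
    rw [show regular_square_body n (acc, c, t) row =
        (acc ++ [PySem.List.insert row c n], c - 1, t) by
      unfold regular_square_body
      simp only [beq_iff_eq, if_neg (by omega : ¬ c = n - 1)]]
    rw [ih _ _ (by omega)]
    have hmap : List.mapIdx (fun i row => PySem.List.insert row (c - ((i + 1 : Nat) : Int)) n) rest
        = List.mapIdx (fun r row => PySem.List.insert row (c - 1 - ((r : Nat) : Int)) n) rest := by
      apply List.ext_getElem (by simp)
      intro idx h1 h2
      simp only [List.getElem_mapIdx]
      congr 1
      push_cast
      ring
    rw [hmap]
    simp only [Prod.mk.injEq, List.append_assoc, List.singleton_append, Nat.cast_zero, sub_zero,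
      List.length_cons]
    exact ⟨trivial, by push_cast; ring, trivial⟩

theorem pv_step_cons (n : Int) (r0 : List Int) (rest : List (List Int)) :
    regular_square_step n (r0 :: rest) =
      (PySem.List.insert r0 (n - 1) n ::
        rest.mapIdx (fun r row => PySem.List.insert row (n - 2 - r) n)) ++ [n :: r0] := by
  unfold regular_square_step
  simp only [List.foldl_cons]
  rw [show regular_square_body n ([], n - 1, []) r0 = ([PySem.List.insert r0 (n - 1) n], n - 2, n :: r0) by
    unfold regular_square_body
    simp only [beq_self_eq_true, if_pos, PySem.List.insert_zero, PySem.List.remove?_cons_self,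
      Option.getD_some, List.nil_append, Prod.mk.injEq]
    exact ⟨trivial, by ring, trivial⟩]
  rw [pv_fold_go n rest _ _ _ (by omega)]
  simp only [List.singleton_append]

-- inserting n+1 at position N-r into row r of the N-square yields row r of the (N+1)-square
theorem pv_row_insert (N r : Nat) (hr : r < N) :
    PySem.List.insert (pvFrow N r) ((N : Int) - r) ((N : Int) + 1) = pvFrow (N + 1) r := by
  rw [show ((N : Int) - r) = ((N - r : Nat) : Int) by omega]
  rw [PySem.List.insert_natCast _ _ _ (by simp [pvFrow])]
  apply List.ext_getElem?
  intro j
  simp only [pvFrow, List.getElem?_append, List.getElem?_take, List.getElem?_drop,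
    List.getElem?_cons, List.getElem?_map, List.length_take,
    List.length_map, List.length_range]
  split_ifs with h1 h2
  · rw [List.getElem?_range (by omega), List.getElem?_range (by omega)]
    simp only [Option.map_some]
    rw [Nat.mod_eq_of_lt (by omega), Nat.mod_eq_of_lt (by omega)]
  · omega
  · rw [List.getElem?_range (by omega)]
    simp only [Option.map_some]
    rw [show (r + j) % (N + 1) = N by
      rw [show r + j = N by omega]; exact Nat.mod_eq_of_lt (by omega)]
  · by_cases hj : j ≤ N
    · rw [show N - r + (j - min (N - r) N - 1) = j - 1 by omega]
      rw [List.getElem?_range (by omega), List.getElem?_range (by omega)]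
      simp only [Option.map_some]
      have e2 : (r + (j - 1)) % N = r + j - 1 - N := by
        rw [Nat.mod_eq_sub_mod (by omega)]
        rw [show r + (j - 1) - N = r + j - 1 - N by omega]
        exact Nat.mod_eq_of_lt (by omega)
      have e3 : (r + j) % (N + 1) = r + j - (N + 1) := by
        rw [Nat.mod_eq_sub_mod (by omega)]
        exact Nat.mod_eq_of_lt (by omega)
      rw [e2, e3]
      congr 2
      omega
    · rw [List.getElem?_eq_none (by simp; omega), List.getElem?_eq_none (by simp; omega)]
      rfl

theorem pv_last_row (N : Nat) (hN : 1 ≤ N) :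
    ((N : Int) + 1) :: pvFrow N 0 = pvFrow (N + 1) N := by
  apply List.ext_getElem?
  intro j
  match j with
  | 0 =>
    simp only [pvFrow, List.getElem?_cons_zero, List.getElem?_map,
      List.getElem?_range (show 0 < N + 1 by omega), Option.map_some]
    rw [show (N + 0) % (N + 1) = N by rw [Nat.add_zero]; exact Nat.mod_eq_of_lt (by omega)]
  | j + 1 =>
    simp only [List.getElem?_cons_succ, pvFrow, List.getElem?_map]
    by_cases hj : j < N
    · rw [List.getElem?_range (by omega), List.getElem?_range (by omega)]
      simp only [Option.map_some]
      rw [show (0 + j) % N = j by rw [Nat.zero_add]; exact Nat.mod_eq_of_lt hj]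
      rw [show (N + (j + 1)) % (N + 1) = j by
        rw [Nat.mod_eq_sub_mod (by omega), show N + (j + 1) - (N + 1) = j by omega]
        exact Nat.mod_eq_of_lt (by omega)]
    · rw [List.getElem?_eq_none (by simp; omega), List.getElem?_eq_none (by simp; omega)]
      rfl

theorem pv_step_F (N : Nat) (hN : 1 ≤ N) :
    regular_square_step ((N : Int) + 1) (pvF N) = pvF (N + 1) := by
  obtain ⟨M, rfl⟩ : ∃ M, N = M + 1 := ⟨N - 1, by omega⟩
  have hF : pvF (M + 1) = pvFrow (M + 1) 0 :: (List.range M).map (fun r => pvFrow (M + 1) (r + 1)) := by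
    unfold pvF
    rw [List.range_succ_eq_map]
    simp [List.map_map, Function.comp_def, Nat.succ_eq_add_one]
  have hF2 : pvF (M + 2) =
      (pvFrow (M + 2) 0 :: (List.range M).map (fun r => pvFrow (M + 2) (r + 1))) ++
        [pvFrow (M + 2) (M + 1)] := by
    unfold pvF
    rw [show M + 2 = (M + 1) + 1 from rfl, List.range_succ, List.map_append, List.range_succ_eq_map]
    simp [List.map_map, Function.comp_def, Nat.succ_eq_add_one]
  rw [hF, pv_step_cons, hF2]
  congr 1
  · congr 1
    · convert pv_row_insert (M + 1) 0 (by omega) using 2 <;> push_cast <;> ring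
    · apply List.ext_getElem (by simp)
      intro idx h1 h2
      rw [List.getElem_mapIdx]
      simp only [List.getElem_map, List.getElem_range]
      simp only [List.length_mapIdx, List.length_map, List.length_range] at h1
      convert pv_row_insert (M + 1) (idx + 1) (by omega) using 2 <;> push_cast <;> ring
  · rw [pv_last_row (M + 1) (by omega)]

theorem pv_rec_eq (k : Nat) : regular_square_rec k = pvF (k + 1) := by
  induction k with
  | zero => decide
  | succ k ih =>
    show regular_square_step ((k : Int) + 2) (regular_square_rec k) = _
    rw [ih, show ((k : Int) + 2) = (((k + 1 : Nat) : Int) + 1) by push_cast; ring]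
    exact pv_step_F (k + 1) (by omega)

-- ===== VERDICT =====
theorem regular_square_spec : Claim_equal_regular_square := by
  intro n _ hpre
  unfold Pre_regular_square at hpre
  unfold Spec_regular_square
  rw [pv_alt_eq n (by omega)]
  unfold regular_square
  by_cases h1 : n = 1
  · subst h1; decide
  · have hn2 : 2 ≤ n := by omega
    simp only [beq_iff_eq, if_neg h1]
    rw [pv_rec_eq]
    congr 1
    omega
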